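-- pv_equiv track=rewrite | github.com/warlockee/paceon | mgr/tools.py | _is_meaningful_change
-- ===== SOURCE A (Python) =====
-- def _is_meaningful_change(old: str, new: str) -> bool:
--     """Return True if the change is more than just a status bar / clock update.
--     Ignores changes that only affect the last line (typically a status bar)
--     or that change fewer than 2 lines out of the tail window."""
--     old_lines = old.split('\n')
--     new_lines = new.split('\n')
--     if len(old_lines) != len(new_lines):
--         return True
--     changed = [i for i in range(len(old_lines)) if old_lines[i] != new_lines[i]]
--     if not changed:
--         return False
--     # Only the last line changed — likely a clock/status bar
--     if changed == [len(old_lines) - 1]: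
--         return False
--     return True
-- ===== SOURCE B (Python) =====
-- def _is_meaningful_change(old: str, new: str) -> bool:
--     old_lines = old.split('\n')
--     new_lines = new.split('\n')
--     if len(old_lines) != len(new_lines):
--         return True
--     # Compare only the first n-1 lines (the last line is the status bar),
--     # returning early at the first difference.
--     for i in range(len(old_lines) - 1):
--         if old_lines[i] != new_lines[i]:
--             return True
--     return False
-- ===== Notes on version B (the rewrite author's own statement) =====
-- stated objective: simpler
-- what changed: B drops the list of changed indices and the changed==[last] comparison: after the length check it early-exit scans only the first n-1 lines, encoding the ignore-the-last-line rule directly.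
import Mathlib
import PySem

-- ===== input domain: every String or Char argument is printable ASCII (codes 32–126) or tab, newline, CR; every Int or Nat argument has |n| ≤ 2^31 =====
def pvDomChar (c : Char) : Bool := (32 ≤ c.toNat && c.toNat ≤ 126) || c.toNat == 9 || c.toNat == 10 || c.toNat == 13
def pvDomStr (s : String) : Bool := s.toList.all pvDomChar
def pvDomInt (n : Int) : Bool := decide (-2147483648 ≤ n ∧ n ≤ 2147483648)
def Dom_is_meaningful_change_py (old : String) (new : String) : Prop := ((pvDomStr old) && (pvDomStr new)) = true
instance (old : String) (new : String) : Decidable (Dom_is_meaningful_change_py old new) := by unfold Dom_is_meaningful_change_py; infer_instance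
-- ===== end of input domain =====

-- B drops the changed-indices list: it early-exit scans only the first n-1 lines (simpler decomposition, same cost).

-- lines = s.split('\n'): split? with a nonempty literal separator is always `some`
def pvLines (s : String) : List String := (PySem.Str.split? s "\n").getD []

-- ===== PORT A =====
def is_meaningful_change_py (old : String) (new : String) : Bool :=
  let old_lines := pvLines old
  let new_lines := pvLines new
  if old_lines.length ≠ new_lines.length then true
  else
    let changed := (PySem.List.pyRange 0 (old_lines.length : Int) 1).filter
      (fun i => PySem.List.pyGetD old_lines i "" != PySem.List.pyGetD new_lines i "")
    if changed = [] then false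
    else if changed = [(old_lines.length : Int) - 1] then false
    else true

-- ===== PORT B =====
-- the 'for i in range(len(old_lines) - 1)' early-exit loop, as structural recursion
-- that stops when one line (the last) remains
def pvScanB : List String → List String → Bool
  | a :: rest@(_ :: _), b :: bs => if a ≠ b then true else pvScanB rest bs
  | _, _ => false

def is_meaningful_change_py_alt (old : String) (new : String) : Bool :=
  let old_lines := pvLines old
  let new_lines := pvLines new
  if old_lines.length ≠ new_lines.length then true
  else pvScanB old_lines new_lines

-- ===== PRECONDITION & SPEC =====
def Spec_is_meaningful_change_py (old : String) (new : String) (out : Bool) : Prop := out = is_meaningful_change_py_alt old new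
instance (old : String) (new : String) (out : Bool) : Decidable (Spec_is_meaningful_change_py old new out) := by unfold Spec_is_meaningful_change_py; infer_instance

-- ===== CLAIM (what is proved, stated in full; the proofs are below) =====
def Claim_equal_is_meaningful_change_py : Prop := ∀ (old : String) (new : String), Dom_is_meaningful_change_py old new → Spec_is_meaningful_change_py old new (is_meaningful_change_py old new)

-- ===== LEMMAS AND PROOFS =====

lemma pvScanB_iff : ∀ (xs ys : List String), xs.length = ys.length →
    (pvScanB xs ys = true ↔ ∃ k : ℕ, k + 1 < xs.length ∧ xs.getD k "" ≠ ys.getD k "")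
  | [], ys, h => by simp [pvScanB]
  | [a], ys, h => by
      match ys, h with
      | [b], _ => simp [pvScanB]
  | a :: b :: as, ys, h => by
      match ys, h with
      | c :: ds, h =>
        have hd : (b :: as).length = ds.length := by simpa using h
        by_cases hac : a = c
        · rw [show pvScanB (a :: b :: as) (c :: ds) = pvScanB (b :: as) ds by
            simp [pvScanB, hac]]
          rw [pvScanB_iff (b :: as) ds hd]
          constructor
          · rintro ⟨k, hk, hne⟩
            exact ⟨k + 1, by simpa using hk, by simpa using hne⟩
          · rintro ⟨k, hk, hne⟩
            cases k with
            | zero => exact absurd hac (by simpa using hne)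
            | succ k => exact ⟨k, by simpa using hk, by simpa using hne⟩
        · constructor
          · intro _
            exact ⟨0, by simp, by simpa using hac⟩
          · intro _
            simp [pvScanB, hac]

-- characterise when A's 'changed' list (restricted to indices < n-1) is empty
lemma filter_front_eq_nil_iff (xs ys : List String) :
    ((PySem.List.pyRange 0 ((xs.length : Int) - 1) 1).filter
        (fun i => PySem.List.pyGetD xs i "" != PySem.List.pyGetD ys i "") = []
      ↔ ¬ ∃ k : ℕ, k + 1 < xs.length ∧ xs.getD k "" ≠ ys.getD k "") := by
  rw [List.filter_eq_nil_iff]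
  constructor
  · rintro h ⟨k, hk, hne⟩
    have hmem : (k : Int) ∈ PySem.List.pyRange 0 ((xs.length : Int) - 1) 1 := by
      rw [PySem.List.mem_pyRange_one]
      constructor
      · exact Int.natCast_nonneg k
      · omega
    have := h _ hmem
    simp [PySem.List.pyGetD_natCast] at this
    exact hne this
  · intro h i hi
    rw [PySem.List.mem_pyRange_one] at hi
    obtain ⟨hi0, hi1⟩ := hi
    lift i to ℕ using hi0 with k
    simp only [bne_iff_ne, ne_eq, Decidable.not_not, PySem.List.pyGetD_natCast]
    by_contra hne
    exact h ⟨k, by omega, hne⟩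

lemma key (xs ys : List String) (h : xs.length = ys.length) :
    (if (PySem.List.pyRange 0 (xs.length : Int) 1).filter
          (fun i => PySem.List.pyGetD xs i "" != PySem.List.pyGetD ys i "") = [] then false
     else if (PySem.List.pyRange 0 (xs.length : Int) 1).filter
          (fun i => PySem.List.pyGetD xs i "" != PySem.List.pyGetD ys i "") = [(xs.length : Int) - 1] then false
     else true) = pvScanB xs ys := by
  rcases Nat.eq_zero_or_pos xs.length with hn | hn
  · rw [List.length_eq_zero_iff] at hn
    subst hn
    have hy : ys = [] := by simpa using h.symm
    subst hy
    simp [PySem.List.pyRange_one_eq_nil, pvScanB]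
  · have hsplit : PySem.List.pyRange 0 (xs.length : Int) 1 =
        PySem.List.pyRange 0 ((xs.length : Int) - 1) 1 ++
          PySem.List.pyRange ((xs.length : Int) - 1) (xs.length : Int) 1 := by
      exact PySem.List.pyRange_one_append 0 ((xs.length : Int) - 1) (xs.length : Int)
        (by omega) (by omega)
    have hlast : PySem.List.pyRange ((xs.length : Int) - 1) (xs.length : Int) 1 =
        [(xs.length : Int) - 1] := by
      have := PySem.List.pyRange_one_singleton ((xs.length : Int) - 1)
      rw [show (xs.length : Int) - 1 + 1 = (xs.length : Int) by omega] at this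
      exact this
    set p := fun i : Int => PySem.List.pyGetD xs i "" != PySem.List.pyGetD ys i "" with hp
    rw [hsplit, hlast, List.filter_append]
    by_cases hF : (PySem.List.pyRange 0 ((xs.length : Int) - 1) 1).filter p = []
    · -- no difference in the first n-1 lines: A returns false either way, B's scan is false
      have hB : pvScanB xs ys = false := by
        rw [← Bool.not_eq_true, pvScanB_iff xs ys h]
        exact (filter_front_eq_nil_iff xs ys).mp hF
      rw [hF, hB]
      by_cases hl : p ((xs.length : Int) - 1)
      · simp [hl]
      · simp [hl]
    · -- some line among the first n-1 differs: A returns true, B's scan finds it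
      have hB : pvScanB xs ys = true := by
        rw [pvScanB_iff xs ys h]
        by_contra hcon
        exact hF ((filter_front_eq_nil_iff xs ys).mpr hcon)
      rw [hB]
      have hne1 : (PySem.List.pyRange 0 ((xs.length : Int) - 1) 1).filter p ++
          List.filter p [(xs.length : Int) - 1] ≠ [] := by
        intro hc
        exact hF (List.append_eq_nil_iff.mp hc).1
      have hne2 : (PySem.List.pyRange 0 ((xs.length : Int) - 1) 1).filter p ++
          List.filter p [(xs.length : Int) - 1] ≠ [(xs.length : Int) - 1] := by
        intro hc
        obtain ⟨i, hi⟩ := List.exists_mem_of_ne_nil _ hF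
        have himem : i ∈ PySem.List.pyRange 0 ((xs.length : Int) - 1) 1 :=
          List.mem_of_mem_filter hi
        have hilt : i < (xs.length : Int) - 1 :=
          ((PySem.List.mem_pyRange_one).mp himem).2
        have : i ∈ ((PySem.List.pyRange 0 ((xs.length : Int) - 1) 1).filter p ++
            List.filter p [(xs.length : Int) - 1]) := List.mem_append_left _ hi
        rw [hc] at this
        simp at this
        omega
      simp [hne1, hne2]

-- ===== VERDICT (by name: the statement is the Claim_ definition above) =====
theorem is_meaningful_change_py_spec : Claim_equal_is_meaningful_change_py := by
  intro old new _dom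
  unfold Spec_is_meaningful_change_py is_meaningful_change_py is_meaningful_change_py_alt
  simp only []
  by_cases hlen : (pvLines old).length ≠ (pvLines new).length
  · simp [hlen]
  · rw [if_neg hlen, if_neg hlen]
    exact key _ _ (not_ne_iff.mp hlen)
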